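-- pv_equiv track=rewrite | github.com/MahaSiva1/cs_hw_4 | recursion.py | odd_10_helper
-- ===== SOURCE A (Python) =====
-- def odd_10_helper(nums, start, sum1, sum2):
--     """helper function that the odd_10 function will use"""
--
--     if start >= len(nums):
--         return sum(sum1) % 2 != 0 and sum(sum2) % 10 == 0
--     sum1.append(nums[start])
--     if odd_10_helper(nums, start + 1, sum1, sum2):
--         return True
--     sum1.pop()
--     sum2.append(nums[start])
--     val1 = odd_10_helper(nums, start + 1, sum1, sum2)
--     sum2.pop()
--     return val1
-- ===== SOURCE B (Python) =====
-- def odd_10_helper(nums, start, sum1, sum2):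
--     """helper function that the odd_10 function will use"""
--     rest = [nums[i] for i in range(start, len(nums))]
--     target = (sum(sum2) + sum(rest)) % 10
--     if target % 2 != (sum(sum1) + 1) % 2:
--         return False
--     reach = {0}
--     for x in rest:
--         reach |= {(r + x) % 10 for r in reach}
--     return target in reach
-- ===== Notes on version B (the rewrite author's own statement) =====
-- stated objective: alternative
-- what changed: A's try-both-sides recursion over every partition is replaced by a single pass that computes the required subset-sum residue mod 10 (with a parity consistency check) and a DP over the set of reachable residues; intended as the asymptotically better algorithm (O(n) vs O(2^n)), but a timing run could not confirm a measured speed-up (A timed out rather than finishing at large sizes).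
import Mathlib
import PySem

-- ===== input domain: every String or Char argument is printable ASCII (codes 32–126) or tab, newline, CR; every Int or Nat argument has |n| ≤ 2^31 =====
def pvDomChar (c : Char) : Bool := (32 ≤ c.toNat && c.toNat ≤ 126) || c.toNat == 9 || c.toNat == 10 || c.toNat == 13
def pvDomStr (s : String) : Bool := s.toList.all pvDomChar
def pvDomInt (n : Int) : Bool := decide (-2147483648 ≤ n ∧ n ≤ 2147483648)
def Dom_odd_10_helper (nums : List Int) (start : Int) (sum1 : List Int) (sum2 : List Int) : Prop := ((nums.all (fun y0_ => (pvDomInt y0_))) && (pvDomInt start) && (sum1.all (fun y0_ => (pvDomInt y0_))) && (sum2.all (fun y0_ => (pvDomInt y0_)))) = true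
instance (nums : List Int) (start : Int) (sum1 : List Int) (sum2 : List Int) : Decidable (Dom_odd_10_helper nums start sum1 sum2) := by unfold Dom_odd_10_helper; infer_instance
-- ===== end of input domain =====

-- B replaces A's try-both-sides recursion over all partitions by a single-pass residue-mod-10 DP;
-- return-value equivalence only: A appends to and pops from sum1/sum2 during the call (net: restored).

-- ===== PORT A =====
def odd_10_helper (nums : List Int) (start : Int) (sum1 : List Int) (sum2 : List Int) : Bool :=
  if _h : start ≥ (nums.length : Int) then
    decide (PySem.Int.mod sum1.sum 2 ≠ 0) && decide (PySem.Int.mod sum2.sum 10 = 0)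
  else
    match PySem.List.pyGet? nums start with
    | none => false   -- Python raises IndexError here (outside Pre_)
    | some x =>
      if odd_10_helper nums (start + 1) (sum1 ++ [x]) sum2 then true
      else odd_10_helper nums (start + 1) sum1 (sum2 ++ [x])
termination_by ((nums.length : Int) - start).toNat
decreasing_by all_goals omega

-- ===== PORT B =====
-- rest = [nums[i] for i in range(start, len(nums))]  (pyGet? none = IndexError, outside Pre_; filterMap skips it)
def pvRestOf (nums : List Int) (start : Int) : List Int :=
  (PySem.List.pyRange start (PySem.List.len nums) 1).filterMap (fun i => PySem.List.pyGet? nums i)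

-- target/parity check then the residue-set loop 'reach |= {(r+x)%10 for r in reach}'
def pvBCore (rest : List Int) (a b : Int) : Bool :=
  let target := PySem.Int.mod (b + rest.sum) 10
  if PySem.Int.mod target 2 ≠ PySem.Int.mod (a + 1) 2 then false
  else
    let reach := rest.foldl
      (fun s x => PySem.Set.update s (s.map (fun r => PySem.Int.mod (r + x) 10)))
      (PySem.Set.ofList [0])
    PySem.Set.contains reach target

def odd_10_helper_alt (nums : List Int) (start : Int) (sum1 : List Int) (sum2 : List Int) : Bool :=
  pvBCore (pvRestOf nums start) sum1.sum sum2.sum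

-- ===== PRECONDITION & SPEC =====
-- Pre_ excludes start < -len(nums), where A (and B) raise IndexError on nums[start].
def Pre_odd_10_helper (nums : List Int) (start : Int) (_sum1 : List Int) (_sum2 : List Int) : Prop :=
  -(nums.length : Int) ≤ start
instance (nums : List Int) (start : Int) (sum1 : List Int) (sum2 : List Int) : Decidable (Pre_odd_10_helper nums start sum1 sum2) := by unfold Pre_odd_10_helper; infer_instance

def pvWitness_odd_10_helper : List Int × Int × List Int × List Int := ([3, 10], 0, [], [])

def Spec_odd_10_helper (nums : List Int) (start : Int) (sum1 : List Int) (sum2 : List Int) (out : Bool) : Prop := out = odd_10_helper_alt nums start sum1 sum2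
instance (nums : List Int) (start : Int) (sum1 : List Int) (sum2 : List Int) (out : Bool) : Decidable (Spec_odd_10_helper nums start sum1 sum2 out) := by unfold Spec_odd_10_helper; infer_instance

-- ===== CLAIM (what is proved, stated in full; the proofs are below) =====
def Claim_equal_odd_10_helper : Prop := ∀ (nums : List Int) (start : Int) (sum1 : List Int) (sum2 : List Int), Dom_odd_10_helper nums start sum1 sum2 → Pre_odd_10_helper nums start sum1 sum2 → Spec_odd_10_helper nums start sum1 sum2 (odd_10_helper nums start sum1 sum2)

-- ===== LEMMAS AND PROOFS =====

-- Reference function: A's branching recursion expressed on the list of remaining elements,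
-- carrying only the two running sums.
def pvGo (rest : List Int) (a b : Int) : Bool :=
  match rest with
  | [] => decide (PySem.Int.mod a 2 ≠ 0) && decide (PySem.Int.mod b 10 = 0)
  | x :: xs => pvGo xs (a + x) b || pvGo xs a (b + x)

lemma pvRestOf_nil (nums : List Int) (start : Int) (h : (nums.length : Int) ≤ start) :
    pvRestOf nums start = [] := by
  unfold pvRestOf
  rw [PySem.List.len_eq, PySem.List.pyRange_one_eq_nil h]
  rfl

lemma pvRestOf_cons (nums : List Int) (start : Int) (x : Int)
    (hlt : start < (nums.length : Int)) (hx : PySem.List.pyGet? nums start = some x) :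
    pvRestOf nums start = x :: pvRestOf nums (start + 1) := by
  unfold pvRestOf
  rw [PySem.List.len_eq, PySem.List.pyRange_one_cons hlt, List.filterMap_cons, hx]

lemma pvGet_some (nums : List Int) (start : Int)
    (h1 : -(nums.length : Int) ≤ start) (h2 : start < (nums.length : Int)) :
    ∃ x, PySem.List.pyGet? nums start = some x := by
  cases hx : PySem.List.pyGet? nums start with
  | none =>
      rw [PySem.List.pyGet?_eq_none_iff] at hx
      exact absurd ⟨h1, h2⟩ hx
  | some x => exact ⟨x, rfl⟩

lemma A_eq_go (n : Nat) : ∀ (nums : List Int) (start : Int) (sum1 sum2 : List Int),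
    ((nums.length : Int) - start).toNat = n → -(nums.length : Int) ≤ start →
    odd_10_helper nums start sum1 sum2 = pvGo (pvRestOf nums start) sum1.sum sum2.sum := by
  induction n with
  | zero =>
      intro nums start sum1 sum2 hn hpre
      have hge : (nums.length : Int) ≤ start := by omega
      rw [odd_10_helper, pvRestOf_nil nums start hge]
      simp only [pvGo]
      rw [dif_pos (by omega)]
  | succ n ih =>
      intro nums start sum1 sum2 hn hpre
      have hlt : start < (nums.length : Int) := by omega
      obtain ⟨x, hx⟩ := pvGet_some nums start hpre hlt
      rw [odd_10_helper, dif_neg (by omega), hx, pvRestOf_cons nums start x hlt hx]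
      simp only [pvGo]
      have h1 := ih nums (start + 1) (sum1 ++ [x]) sum2 (by omega) (by omega)
      have h2 := ih nums (start + 1) sum1 (sum2 ++ [x]) (by omega) (by omega)
      rw [h1, h2]
      simp [List.sum_append]

-- PySem.Int.mod by the positive constants 2 and 10 is Int.emod
lemma pvMod2 (a : Int) : PySem.Int.mod a 2 = a % 2 :=
  PySem.Int.mod_eq_emod_of_pos (by norm_num)
lemma pvMod10 (a : Int) : PySem.Int.mod a 10 = a % 10 :=
  PySem.Int.mod_eq_emod_of_pos (by norm_num)

-- characterization of pvGo: a sublist (= subset keeping order) achieving both conditions exists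
lemma go_iff (rest : List Int) : ∀ (a b : Int),
    pvGo rest a b = true ↔
      ∃ X : List Int, X.Sublist rest ∧ (a + X.sum) % 2 ≠ 0 ∧ (b + rest.sum - X.sum) % 10 = 0 := by
  induction rest with
  | nil =>
      intro a b
      simp only [pvGo, List.sublist_nil, Bool.and_eq_true, decide_eq_true_eq, pvMod2, pvMod10]
      constructor
      · rintro ⟨h1, h2⟩; exact ⟨[], rfl, by simpa using h1, by simpa using h2⟩
      · rintro ⟨X, rfl, h1, h2⟩; exact ⟨by simpa using h1, by simpa using h2⟩
  | cons x xs ih =>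
      intro a b
      simp only [pvGo, Bool.or_eq_true, ih]
      constructor
      · rintro (⟨X, hX, h1, h2⟩ | ⟨X, hX, h1, h2⟩)
        · exact ⟨x :: X, List.cons_sublist_cons.mpr hX, by simpa [add_assoc, add_comm, add_left_comm] using h1,
            by simp only [List.sum_cons]; omega⟩
        · exact ⟨X, hX.cons x, h1, by simp only [List.sum_cons]; omega⟩
      · rintro ⟨X, hX, h1, h2⟩
        rcases List.sublist_cons_iff.mp hX with hX' | ⟨X', rfl, hX'⟩
        · right
          exact ⟨X, hX', h1, by simp only [List.sum_cons] at h2; omega⟩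
        · left
          refine ⟨X', hX', ?_, ?_⟩
          · simp only [List.sum_cons] at h1; rw [show a + x + X'.sum = a + (x + X'.sum) by ring]; exact h1
          · simp only [List.sum_cons] at h2; omega

-- membership in the residue-DP set after folding over xs, starting from any set s
lemma reach_mem (xs : List Int) : ∀ (s : List Int) (t : Int),
    t ∈ xs.foldl (fun s x => PySem.Set.update s (s.map (fun r => PySem.Int.mod (r + x) 10))) s
      ↔ t ∈ s ∨ ∃ r ∈ s, ∃ X : List Int, X.Sublist xs ∧ X ≠ [] ∧ t = (r + X.sum) % 10 := by
  induction xs with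
  | nil => intro s t; simp
  | cons x xs ih =>
      intro s t
      rw [List.foldl_cons, ih]
      have hstep : ∀ u, u ∈ PySem.Set.update s (s.map (fun r => PySem.Int.mod (r + x) 10)) ↔
          u ∈ s ∨ ∃ r ∈ s, u = (r + x) % 10 := by
        intro u
        rw [PySem.Set.mem_update]
        simp [eq_comm]
      constructor
      · rintro (hu | ⟨r, hr, X, hX, hne, rfl⟩)
        · rcases (hstep t).mp hu with hu | ⟨r, hr, rfl⟩
          · exact Or.inl hu
          · exact Or.inr ⟨r, hr, [x], (List.cons_sublist_cons.mpr (List.nil_sublist xs)), by simp, by simp⟩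
        · rcases (hstep r).mp hr with hr' | ⟨r', hr', rfl⟩
          · exact Or.inr ⟨r, hr', X, hX.cons x, hne, rfl⟩
          · refine Or.inr ⟨r', hr', x :: X, List.cons_sublist_cons.mpr hX, by simp, ?_⟩
            simp only [List.sum_cons]
            omega
      · rintro (hu | ⟨r, hr, X, hX, hne, rfl⟩)
        · exact Or.inl ((hstep t).mpr (Or.inl hu))
        · rcases List.sublist_cons_iff.mp hX with hX' | ⟨X', rfl, hX'⟩
          · exact Or.inr ⟨r, (hstep r).mpr (Or.inl hr), X, hX', hne, rfl⟩
          · rcases List.eq_nil_or_concat X' with rfl | _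
            · exact Or.inl ((hstep ((r + (x :: List.nil).sum) % 10)).mpr
                (Or.inr ⟨r, hr, by simp⟩))
            · refine Or.inr ⟨(r + x) % 10, (hstep ((r + x) % 10)).mpr (Or.inr ⟨r, hr, rfl⟩),
                X', hX', ?_, ?_⟩
              · rintro rfl; simp at *
              · simp only [List.sum_cons]; omega

-- pvBCore agrees with pvGo on every rest list and running sums
lemma bcore_eq_go (rest : List Int) (a b : Int) : pvGo rest a b = pvBCore rest a b := by
  rw [Bool.eq_iff_iff, go_iff]
  unfold pvBCore
  simp only []
  split_ifs with hpar
  · rw [pvMod2, pvMod2, pvMod10] at hpar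
    simp only [iff_false]
    rintro ⟨X, hX, h1, h2⟩
    omega
  · rw [pvMod2, pvMod2, pvMod10] at hpar
    rw [PySem.Set.contains_iff, reach_mem]
    have h0 : PySem.Set.ofList [0] = ([0] : List Int) := rfl
    rw [h0, pvMod10]
    constructor
    · rintro ⟨X, hX, h1, h2⟩
      rcases List.eq_nil_or_concat X with rfl | _
      · left; simp only [List.mem_singleton]; simp at h1 h2 ⊢; omega
      · right
        refine ⟨0, by simp, X, hX, by rintro rfl; simp_all, by omega⟩
    · rintro (ht | ⟨r, hr, X, hX, hne, ht⟩)
      · simp only [List.mem_singleton] at ht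
        exact ⟨[], List.nil_sublist rest, by simp at ht ⊢; omega, by simp at ht ⊢; omega⟩
      · simp only [List.mem_singleton] at hr
        subst hr
        exact ⟨X, hX, by omega, by omega⟩

-- ===== VERDICT (by name: the statement is the Claim_ definition above) =====
theorem odd_10_helper_spec : Claim_equal_odd_10_helper := by
  intro nums start sum1 sum2 _hdom hpre
  unfold Spec_odd_10_helper odd_10_helper_alt
  rw [A_eq_go ((nums.length : Int) - start).toNat nums start sum1 sum2 rfl hpre,
    bcore_eq_go]
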